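-- pv_equiv track=rewrite | github.com/DMB3/advent-of-code | python/2022/003/part_two.py | do_group
-- ===== SOURCE A (Python) =====
-- def do_group(group):
--     result = 0
--
--     common_characters = list(set(group[0]).intersection(set(group[1])).intersection(set(group[2])))
--
--     for character in common_characters:
--         if character.islower():
--             result += ord(character) - 96
--         else:
--             result += ord(character) - 38
--
--     return result
-- ===== SOURCE B (Python) =====
-- def _mask(s):
--     m = 0
--     for ch in s:
--         m |= 1 << ord(ch)
--     return m
--
-- def do_group(group):
--     m = _mask(group[0]) & _mask(group[1]) & _mask(group[2])
--     result = 0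
--     code = 0
--     while m:
--         if m & 1:
--             result += code - 96 if chr(code).islower() else code - 38
--         m >>= 1
--         code += 1
--     return result
-- ===== Notes on version B (the rewrite author's own statement) =====
-- stated objective: alternative
-- what changed: B encodes each string as an integer bitset over character codes, intersects the three strings with a single bitwise AND, and sums priorities by walking the set bits of the resulting integer, instead of building hash sets, intersecting them and looping over a character collection.
import Mathlib
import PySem

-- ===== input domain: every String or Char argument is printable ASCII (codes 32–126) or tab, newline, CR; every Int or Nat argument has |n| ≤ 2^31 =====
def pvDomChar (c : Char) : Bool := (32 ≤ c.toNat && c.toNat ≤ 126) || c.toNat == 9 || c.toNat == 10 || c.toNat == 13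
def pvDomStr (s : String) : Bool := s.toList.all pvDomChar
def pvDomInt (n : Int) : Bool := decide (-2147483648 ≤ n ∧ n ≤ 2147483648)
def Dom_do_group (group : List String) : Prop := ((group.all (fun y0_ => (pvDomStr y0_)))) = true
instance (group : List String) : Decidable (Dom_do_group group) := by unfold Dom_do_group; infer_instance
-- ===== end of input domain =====

-- B replaces A's set-intersection-then-loop by integer bitsets over character codes:
-- AND of three masks, then a walk over the set bits (alternative algorithm, return value only).


-- ===== PORT A =====
-- list(set(...)) iterates in Python's unmodelled hash order; the loop only SUMS over it,
-- which is order-independent, so folding over the Set's list is exact.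
def do_group (group : List String) : Int :=
  List.foldl
    (fun result character =>
      if PySem.Chars.islower character then result + ((character.toNat : Int) - 96)
      else result + ((character.toNat : Int) - 38))
    0
    (PySem.Set.inter
      (PySem.Set.inter (PySem.Set.ofList (PySem.List.pyGetD group 0 "").toList)
        (PySem.Set.ofList (PySem.List.pyGetD group 1 "").toList))
      (PySem.Set.ofList (PySem.List.pyGetD group 2 "").toList))

-- ===== PORT B =====
-- Python's arbitrary-precision masks are nonnegative throughout (built by | of 1<<ord),
-- so they are ported as Nat; bit operations coincide with Python's on nonnegative ints.
def pvMask (s : List Char) : Nat :=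
  s.foldl (fun m ch => m ||| (1 <<< ch.toNat)) 0

-- the while loop: 'while m: if m & 1: result += …; m >>= 1; code += 1'
def pvBitLoop (m : Nat) (code : Nat) (result : Int) : Int :=
  if h : m = 0 then result
  else
    pvBitLoop (m >>> 1) (code + 1)
      (if m &&& 1 = 1 then
        result + (if PySem.Chars.islower (Char.ofNat code) then (code : Int) - 96
                  else (code : Int) - 38)
       else result)
decreasing_by
  simpa [Nat.shiftRight_succ, Nat.shiftRight_zero] using Nat.div_lt_self (Nat.pos_of_ne_zero h) one_lt_two

def do_group_alt (group : List String) : Int :=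
  pvBitLoop
    (pvMask (PySem.List.pyGetD group 0 "").toList &&&
     pvMask (PySem.List.pyGetD group 1 "").toList &&&
     pvMask (PySem.List.pyGetD group 2 "").toList)
    0 0

-- ===== PRECONDITION & SPEC =====
-- Python A indexes group[0], group[1], group[2]: with fewer than 3 strings it raises IndexError.
def Pre_do_group (group : List String) : Prop := 3 ≤ group.length
instance (group : List String) : Decidable (Pre_do_group group) := by unfold Pre_do_group; infer_instance
def pvWitness_do_group : List String := ["abcz", "bcd", "cbz"]

def Spec_do_group (group : List String) (out : Int) : Prop := out = do_group_alt group
instance (group : List String) (out : Int) : Decidable (Spec_do_group group out) := by unfold Spec_do_group; infer_instance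

-- ===== CLAIM (what is proved, stated in full; the proofs are below) =====
def Claim_equal_do_group : Prop := ∀ (group : List String), Dom_do_group group → Pre_do_group group → Spec_do_group group (do_group group)

-- ===== LEMMAS AND PROOFS =====

def pvPrio (c : Char) : Int :=
  if PySem.Chars.islower c then (c.toNat : Int) - 96 else (c.toNat : Int) - 38

def pvPrioCode (code : Nat) : Int :=
  if PySem.Chars.islower (Char.ofNat code) then (code : Int) - 96 else (code : Int) - 38

-- indices of the set bits of m
def pvBits (m : Nat) : List Nat :=
  if h : m = 0 then []
  else (if m &&& 1 = 1 then [0] else []) ++ (pvBits (m >>> 1)).map (· + 1)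
decreasing_by
  simpa [Nat.shiftRight_succ, Nat.shiftRight_zero] using Nat.div_lt_self (Nat.pos_of_ne_zero h) one_lt_two

theorem pvFoldAdd (l : List Char) (r : Int) :
    List.foldl
      (fun result character =>
        if PySem.Chars.islower character then result + ((character.toNat : Int) - 96)
        else result + ((character.toNat : Int) - 38)) r l
      = r + (l.map pvPrio).sum := by
  have h : (fun (result : Int) character =>
        if PySem.Chars.islower character then result + ((character.toNat : Int) - 96)
        else result + ((character.toNat : Int) - 38))
      = fun result character => result + pvPrio character := by
    funext result character
    by_cases hc : PySem.Chars.islower character <;> simp [pvPrio, hc]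
  rw [h, PySem.List.foldl_add]

theorem pvBitLoopEq (m : Nat) : ∀ (code : Nat) (res : Int),
    pvBitLoop m code res = res + ((pvBits m).map (fun i => pvPrioCode (code + i))).sum := by
  induction m using Nat.strong_induction_on with
  | _ m ih =>
    intro code res
    rw [pvBitLoop, pvBits]
    by_cases h : m = 0
    · simp [h]
    · have hlt : m >>> 1 < m := by
        simpa [Nat.shiftRight_succ, Nat.shiftRight_zero] using
          Nat.div_lt_self (Nat.pos_of_ne_zero h) one_lt_two
      rw [dif_neg h, dif_neg h, ih _ hlt]
      simp only [Nat.and_one_is_mod]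
      by_cases hb : m % 2 = 1 <;>
        simp [hb, List.map_map, Function.comp_def, pvPrioCode,
          Nat.add_comm 1, add_assoc]

theorem pvMemBits (m : Nat) : ∀ c, c ∈ pvBits m ↔ m.testBit c := by
  induction m using Nat.strong_induction_on with
  | _ m ih =>
    intro c
    rw [pvBits]
    by_cases h : m = 0
    · simp [h]
    · have hlt : m >>> 1 < m := by
        simpa [Nat.shiftRight_succ, Nat.shiftRight_zero] using
          Nat.div_lt_self (Nat.pos_of_ne_zero h) one_lt_two
      rw [dif_neg h]
      match c with
      | 0 =>
        have h0 : m.testBit 0 = ((m &&& 1) == 1) := by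
          simp [Nat.testBit, Nat.and_one_is_mod, Nat.shiftRight_zero]
        by_cases hb : m &&& 1 = 1 <;> simp [hb, h0]
      | c + 1 =>
        have hs : m.testBit (c + 1) = (m >>> 1).testBit c := by
          simp [Nat.testBit_add_one, Nat.shiftRight_succ, Nat.shiftRight_zero]
        rw [hs, ← ih _ hlt c]
        by_cases hb : m &&& 1 = 1 <;> simp [hb]

theorem pvNodupBits (m : Nat) : (pvBits m).Nodup := by
  induction m using Nat.strong_induction_on with
  | _ m ih =>
    rw [pvBits]
    by_cases h : m = 0
    · simp [h]
    · have hlt : m >>> 1 < m := by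
        simpa [Nat.shiftRight_succ, Nat.shiftRight_zero] using
          Nat.div_lt_self (Nat.pos_of_ne_zero h) one_lt_two
      have hmap : ((pvBits (m >>> 1)).map (· + 1)).Nodup :=
        (ih _ hlt).map (fun a b => by omega)
      simp only [Nat.and_one_is_mod]
      by_cases hb : m % 2 = 1 <;> simp [h, hb, hmap]

theorem pvTestMask (l : List Char) (c : Nat) :
    (pvMask l).testBit c ↔ c ∈ l.map Char.toNat := by
  suffices h : ∀ a : Nat, (l.foldl (fun m ch => m ||| (1 <<< ch.toNat)) a).testBit c
      ↔ a.testBit c ∨ c ∈ l.map Char.toNat by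
    simpa [pvMask] using h 0
  induction l with
  | nil => simp
  | cons ch l ihl =>
    intro a
    simp only [List.foldl_cons, ihl, Nat.testBit_or, List.map_cons, List.mem_cons]
    have h1 : (1 <<< ch.toNat).testBit c ↔ c = ch.toNat := by
      rw [Nat.one_shiftLeft, Nat.testBit_two_pow]
      simp [eq_comm]
    rw [Bool.or_eq_true, h1]
    tauto

theorem pvCharToNatInj : Function.Injective Char.toNat := by
  intro a b h
  have : a.val.toNat = b.val.toNat := h
  exact Char.ext (by exact UInt32.toNat_inj.mp this)

theorem pvMemInter (l0 l1 l2 : List Char) (ch : Char) :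
    ch ∈ PySem.Set.inter (PySem.Set.inter (PySem.Set.ofList l0) (PySem.Set.ofList l1))
        (PySem.Set.ofList l2)
      ↔ ch ∈ l0 ∧ ch ∈ l1 ∧ ch ∈ l2 := by
  simp only [PySem.Set.inter, List.mem_filter, PySem.Set.contains_eq_listContains,
    List.contains_eq_mem, decide_eq_true_eq, PySem.Set.mem_ofList]
  tauto

theorem pvNodupInter (l0 l1 l2 : List Char) :
    (PySem.Set.inter (PySem.Set.inter (PySem.Set.ofList l0) (PySem.Set.ofList l1))
        (PySem.Set.ofList l2)).Nodup := by
  exact List.Nodup.filter _ (List.Nodup.filter _ (PySem.Set.nodup_ofList l0))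

-- ===== VERDICT (by name: the statement is the Claim_ definition above) =====
theorem do_group_spec : Claim_equal_do_group := by
  unfold Claim_equal_do_group
  intro group _ _
  unfold Spec_do_group do_group do_group_alt
  set l0 := (PySem.List.pyGetD group 0 "").toList
  set l1 := (PySem.List.pyGetD group 1 "").toList
  set l2 := (PySem.List.pyGetD group 2 "").toList
  set I := PySem.Set.inter (PySem.Set.inter (PySem.Set.ofList l0) (PySem.Set.ofList l1))
      (PySem.Set.ofList l2) with hI
  set M := pvMask l0 &&& pvMask l1 &&& pvMask l2 with hM
  rw [pvFoldAdd, pvBitLoopEq, zero_add, zero_add]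
  have hperm : (pvBits M).Perm (I.map Char.toNat) := by
    rw [List.perm_ext_iff_of_nodup (pvNodupBits M)
      ((pvNodupInter l0 l1 l2).map pvCharToNatInj)]
    intro c
    rw [pvMemBits, hM]
    simp only [Nat.testBit_and, Bool.and_eq_true, pvTestMask]
    constructor
    · rintro ⟨⟨h0, h1⟩, h2⟩
      simp only [List.mem_map] at h0 h1 h2 ⊢
      obtain ⟨a0, ha0, rfl⟩ := h0
      obtain ⟨a1, ha1, e1⟩ := h1
      obtain ⟨a2, ha2, e2⟩ := h2
      refine ⟨a0, (pvMemInter l0 l1 l2 a0).2 ⟨ha0, ?_, ?_⟩, rfl⟩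
      · rwa [pvCharToNatInj e1] at ha1
      · rwa [pvCharToNatInj e2] at ha2
    · intro h
      simp only [List.mem_map] at h ⊢
      obtain ⟨a, ha, rfl⟩ := h
      obtain ⟨h0, h1, h2⟩ := (pvMemInter l0 l1 l2 a).1 ha
      exact ⟨⟨⟨a, h0, rfl⟩, ⟨a, h1, rfl⟩⟩, ⟨a, h2, rfl⟩⟩
  have hsum : ((pvBits M).map pvPrioCode).sum = (I.map pvPrio).sum := by
    rw [(hperm.map pvPrioCode).sum_eq, List.map_map]
    congr 1
    apply List.map_congr_left
    intro a _
    simp [Function.comp, pvPrioCode, pvPrio, Char.ofNat_toNat]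
  calc (I.map pvPrio).sum = ((pvBits M).map pvPrioCode).sum := hsum.symm
    _ = ((pvBits M).map fun i => pvPrioCode (0 + i)).sum := by simp
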